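-- pv_equiv track=rewrite | github.com/handcraftsman/GeneticAlgorithmsWithPython | ch17/regexTests.py | repair_regex
-- ===== SOURCE A (Python) =====
-- repeatMetas = {'?', '*', '+', '{2}', '{2,}'}
--
-- startMetas = {'|', '(', '['}
--
-- endMetas = {')', ']'}
--
-- def repair_regex(genes):
--     result = []
--     finals = []
--     f = repair_ignore_repeat_metas
--     for token in genes:
--         f = f(token, result, finals)
--     if ']' in finals and result[-1] == '[':
--         del result[-1]
--     result.extend(reversed(finals))
--     return ''.join(result)
--
-- def repair_ignore_repeat_metas(token, result, finals):
--     if token in repeatMetas or token in endMetas: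
--         return repair_ignore_repeat_metas
--     if token == '(':
--         finals.append(')')
--     result.append(token)
--     if token == '[':
--         finals.append(']')
--         return repair_in_character_set
--     return repair_ignore_repeat_metas_following_repeat_or_start_metas
--
-- def repair_ignore_repeat_metas_following_repeat_or_start_metas(token,
--                                                                result,
--                                                                finals):
--     last = result[-1]
--     if token not in repeatMetas:
--         if token == '[':
--             result.append(token)
--             finals.append(']')
--             return repair_in_character_set
--         if token == '(':
--             finals.append(')')
--         elif token == ')':
--             match = ''.join(finals).rfind(')')
--             if match != -1:
--                 del finals[match]
--             else:
--                 result[0:0] = ['(']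
--         result.append(token)
--     elif last in startMetas:
--         pass
--     elif token == '?' and last == '?' and len(result) > 2 and \
--                     result[-2] in repeatMetas:
--         pass
--     elif last in repeatMetas:
--         pass
--     else:
--         result.append(token)
--     return repair_ignore_repeat_metas_following_repeat_or_start_metas
--
-- def repair_in_character_set(token, result, finals):
--     if token == ']':
--         if result[-1] == '[':
--             del result[-1]
--         result.append(token)
--         match = ''.join(finals).rfind(']')
--         if match != -1:
--             del finals[match]
--         return repair_ignore_repeat_metas_following_repeat_or_start_metas
--     elif token == '[':
--         pass
--     elif token == '|' and result[-1] == '|':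
--         pass  # suppresses FutureWarning about ||
--     else:
--         result.append(token)
--     return repair_in_character_set
-- ===== SOURCE B (Python) =====
-- repeatMetas = {'?', '*', '+', '{2}', '{2,}'}
-- startMetas = {'|', '(', '['}
--
-- _skippable = repeatMetas | {')', ']'}
--
-- def _split(genes):
--     # Stage 1: cut the stream into plain tokens and character-set chunks
--     # (character sets cannot nest, so this is a plain scan to the next ']').
--     units = []
--     i, n = 0, len(genes)
--     while i < n:
--         t = genes[i]
--         if t == '[':
--             j = i + 1
--             while j < n and genes[j] != ']':
--                 j += 1
--             units.append(('s', genes[i + 1:j]))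
--             i = j + 1
--         else:
--             units.append(('t', t))
--             i += 1
--     return units
--
-- def _render_set(body):
--     # Stage 2: a character set is rendered independently of everything else;
--     # an empty set collapses to a lone ']' (closed or not).
--     clean = []
--     for t in body:
--         if t == '[':
--             continue
--         if t == '|' and clean and clean[-1] == '|':
--             continue
--         clean.append(t)
--     return [']'] if not clean else ['['] + clean + [']']
--
-- def repair_regex(genes):
--     # Stage 3: skip the ignorable prefix, then one linear fold with two
--     # counters (open '(' still to close; unmatched ')' to prefix with '(')
--     # replacing A's closer list with its join/rfind rescans.
--     units = _split(genes)
--     k = 0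
--     while k < len(units) and units[k][0] == 't' and units[k][1] in _skippable:
--         k += 1
--     out = []
--     opens = 0    # '(' still waiting for a ')' closer appended at the end
--     pending = 0  # unmatched ')' tokens: that many '(' prefixed at the front
--     for kind, u in units[k:]:
--         if kind == 's':
--             out.extend(_render_set(u))
--         elif u in repeatMetas:
--             if out and out[-1] not in startMetas and out[-1] not in repeatMetas:
--                 out.append(u)
--         elif u == '(':
--             opens += 1
--             out.append(u)
--         elif u == ')':
--             if opens:
--                 opens -= 1
--             else:
--                 pending += 1
--             out.append(u)
--         else:
--             out.append(u)
--     return '(' * pending + ''.join(out) + ')' * opens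
-- ===== Notes on version B (the rewrite author's own statement) =====
-- stated objective: alternative
-- what changed: Replaced A's one-pass function-dispatch state machine (shared closer list with ''.join(finals).rfind(...) rescans and result[0:0] front splices) by a three-stage pipeline: split the stream into plain tokens and character-set chunks, render each character set independently, then one linear fold whose whole closer bookkeeping is two integer counters (open '(' to close at the end, unmatched ')' to prefix with '(').
import Mathlib
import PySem

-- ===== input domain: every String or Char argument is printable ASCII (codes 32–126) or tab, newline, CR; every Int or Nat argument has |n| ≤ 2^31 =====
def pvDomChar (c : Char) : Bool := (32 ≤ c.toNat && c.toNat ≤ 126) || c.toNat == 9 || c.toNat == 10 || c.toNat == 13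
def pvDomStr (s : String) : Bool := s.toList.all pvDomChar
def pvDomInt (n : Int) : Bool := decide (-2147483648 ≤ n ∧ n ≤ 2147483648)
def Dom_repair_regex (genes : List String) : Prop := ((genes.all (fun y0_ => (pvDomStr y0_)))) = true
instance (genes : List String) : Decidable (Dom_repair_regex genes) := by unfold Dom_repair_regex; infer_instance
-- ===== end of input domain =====

-- B replaces A's one-pass function-dispatch state machine (closer list with join/rfind rescans,
-- front splices) by three stages: split the stream into plain tokens and character-set chunks,
-- render each chunk independently, then one linear fold with two integer counters (objective:
-- alternative).

-- ===== PORT A =====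
inductive RSt : Type
  | ign | fol | cset
deriving DecidableEq, Repr

def repeatMetas : PySem.Set String := PySem.Set.ofList ["?", "*", "+", "{2}", "{2,}"]

def startMetas : PySem.Set String := PySem.Set.ofList ["|", "(", "["]

def endMetas : PySem.Set String := PySem.Set.ofList [")", "]"]

def repairIgnore (token : String) (result finals : List String) :
    RSt × List String × List String :=
  if PySem.Set.contains repeatMetas token || PySem.Set.contains endMetas token then
    (.ign, result, finals)
  else
    let finals := if token == "(" then finals ++ [")"] else finals
    let result := result ++ [token]
    if token == "[" then (.cset, result, finals ++ ["]"])
    else (.fol, result, finals)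

def repairFollowing (token : String) (result finals : List String) :
    RSt × List String × List String :=
  -- result is nonempty whenever Python reaches this state, so `.getD ""` for result[-1] is exact
  let last := (PySem.List.pyGet? result (-1)).getD ""
  if !PySem.Set.contains repeatMetas token then
    if token == "[" then (.cset, result ++ [token], finals ++ ["]"])
    else
      let rf : List String × List String :=
        if token == "(" then (result, finals ++ [")"])
        else if token == ")" then
          let m := PySem.Str.rfind (PySem.Str.join "" finals) ")"
          -- del finals[m]; exact: finals holds only the single-char strings ")" and "]"
          if m != -1 then (result, finals.take m.toNat ++ finals.drop (m.toNat + 1))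
          else ("(" :: result, finals)
        else (result, finals)
      (.fol, rf.1 ++ [token], rf.2)
  else if PySem.Set.contains startMetas last then (.fol, result, finals)
  else if token == "?" && last == "?" && decide (result.length > 2) &&
      PySem.Set.contains repeatMetas ((PySem.List.pyGet? result (-2)).getD "") then
    (.fol, result, finals)
  else if PySem.Set.contains repeatMetas last then (.fol, result, finals)
  else (.fol, result ++ [token], finals)

def repairInCharSet (token : String) (result finals : List String) :
    RSt × List String × List String :=
  if token == "]" then
    -- result is nonempty in this state, so dropLast is Python's `del result[-1]`
    let result := if (PySem.List.pyGet? result (-1)).getD "" == "[" then result.dropLast else result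
    let result := result ++ [token]
    let m := PySem.Str.rfind (PySem.Str.join "" finals) "]"
    let finals := if m != -1 then finals.take m.toNat ++ finals.drop (m.toNat + 1) else finals
    (.fol, result, finals)
  else if token == "[" then (.cset, result, finals)
  else if token == "|" && (PySem.List.pyGet? result (-1)).getD "" == "|" then (.cset, result, finals)
  else (.cset, result ++ [token], finals)

def repairStep (st : RSt × List String × List String) (token : String) :
    RSt × List String × List String :=
  match st.1 with
  | .ign => repairIgnore token st.2.1 st.2.2
  | .fol => repairFollowing token st.2.1 st.2.2
  | .cset => repairInCharSet token st.2.1 st.2.2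

def repair_regex (genes : List String) : String :=
  let acc := genes.foldl repairStep (.ign, [], [])
  let result := acc.2.1
  let finals := acc.2.2
  -- `']' in finals` guarantees result is nonempty, so result[-1] / del result[-1] are exact below
  let result :=
    if finals.contains "]" && ((PySem.List.pyGet? result (-1)).getD "" == "[") then result.dropLast
    else result
  PySem.Str.join "" (result ++ finals.reverse)

-- ===== PORT B =====
inductive BUnit : Type
  | tok : String → BUnit
  | set : List String → BUnit
deriving DecidableEq, Repr

-- _split: scan to the next ']' for each '[' (the two nested while loops)
def splitUnits : List String → List BUnit
  | [] => []
  | t :: rest =>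
    if t == "[" then
      .set (rest.takeWhile (· ≠ "]")) :: splitUnits ((rest.dropWhile (· ≠ "]")).drop 1)
    else .tok t :: splitUnits rest
termination_by l => l.length
decreasing_by
  · have := List.length_dropWhile_le (fun x => decide (x ≠ "]")) rest
    simp only [List.length_drop, List.length_cons]; omega
  · simp

-- _render_set; `clean and clean[-1]=='|'` is exact as getLast?.getD "": "" ≠ "|" on empty
def cleanStep (cl : List String) (t : String) : List String :=
  if t == "[" then cl
  else if t == "|" && (cl.getLast?.getD "" == "|") then cl
  else cl ++ [t]

def renderSet (body : List String) : List String :=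
  let clean := body.foldl cleanStep []
  if clean = [] then ["]"] else "[" :: clean ++ ["]"]

def skippableU (u : BUnit) : Bool :=
  match u with
  | .tok t => PySem.Set.contains repeatMetas t || t == ")" || t == "]"
  | .set _ => false

-- state (out, opens, pending)
def stepB (st : List String × Nat × Nat) (u : BUnit) : List String × Nat × Nat :=
  match u with
  | .set body => (st.1 ++ renderSet body, st.2.1, st.2.2)
  | .tok t =>
    if PySem.Set.contains repeatMetas t then
      -- `out and out[-1] not in startMetas and out[-1] not in repeatMetas`
      if st.1 ≠ [] ∧ ¬PySem.Set.contains startMetas (st.1.getLast?.getD "") ∧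
          ¬PySem.Set.contains repeatMetas (st.1.getLast?.getD "") then
        (st.1 ++ [t], st.2.1, st.2.2)
      else st
    else if t == "(" then (st.1 ++ [t], st.2.1 + 1, st.2.2)
    else if t == ")" then
      if st.2.1 ≠ 0 then (st.1 ++ [t], st.2.1 - 1, st.2.2)
      else (st.1 ++ [t], st.2.1, st.2.2 + 1)
    else (st.1 ++ [t], st.2.1, st.2.2)

def repair_regex_alt (genes : List String) : String :=
  let units := (splitUnits genes).dropWhile skippableU
  let acc := units.foldl stepB ([], 0, 0)
  -- '(' * pending + ''.join(out) + ')' * opens: one empty-separator join of the three pieces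
  PySem.Str.join "" (List.replicate acc.2.2 "(" ++ acc.1 ++ List.replicate acc.2.1 ")")

-- ===== PRECONDITION & SPEC =====
def Spec_repair_regex (genes : List String) (out : String) : Prop := out = repair_regex_alt genes
instance (genes : List String) (out : String) : Decidable (Spec_repair_regex genes out) := by
  unfold Spec_repair_regex; infer_instance

-- ===== CLAIM (what is proved, stated in full; the proofs are below) =====
def Claim_equal_repair_regex : Prop :=
  ∀ (genes : List String), Dom_repair_regex genes → Spec_repair_regex genes (repair_regex genes)

-- ===== LEMMAS AND PROOFS =====

-- the post-fold tails of the two ports, as named helpers for the induction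
def finishA (st : RSt × List String × List String) : String :=
  let result := st.2.1
  let finals := st.2.2
  let result :=
    if finals.contains "]" && ((PySem.List.pyGet? result (-1)).getD "" == "[") then result.dropLast
    else result
  PySem.Str.join "" (result ++ finals.reverse)

def finishB (st : List String × Nat × Nat) : String :=
  PySem.Str.join "" (List.replicate st.2.2 "(" ++ st.1 ++ List.replicate st.2.1 ")")

theorem repair_regex_eq_finishA (genes : List String) :
    repair_regex genes = finishA (genes.foldl repairStep (.ign, [], [])) := rfl

theorem repair_regex_alt_eq_finishB (genes : List String) :
    repair_regex_alt genes =
      finishB (((splitUnits genes).dropWhile skippableU).foldl stepB ([], 0, 0)) := rfl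

-- rfind machinery over the finals list (elements are the one-char strings ")" and "]")
theorem go_unfold (s sub : List Char) (k : Nat) :
    PySem.Chars.rfind.go s sub k =
      if sub.isPrefixOf (s.drop k) then (k : Int)
      else if k = 0 then -1 else PySem.Chars.rfind.go s sub (k - 1) := by
  cases k with
  | zero => simp [PySem.Chars.rfind.go]
  | succ j => simp [PySem.Chars.rfind.go]

theorem isPrefixOf_singleton (c : Char) (l : List Char) :
    [c].isPrefixOf l = (l.head? == some c) := by
  cases l with
  | nil => simp [List.isPrefixOf]
  | cons d ds => simp [List.isPrefixOf, BEq.comm]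

theorem go_snoc (cs : List Char) (x c : Char) (k : Nat) (hk : k < cs.length) :
    PySem.Chars.rfind.go (cs ++ [x]) [c] k = PySem.Chars.rfind.go cs [c] k := by
  induction k with
  | zero =>
      rw [go_unfold (cs ++ [x]) [c] 0, go_unfold cs [c] 0]
      rw [List.drop_zero, List.drop_zero, isPrefixOf_singleton, isPrefixOf_singleton,
        List.head?_append_of_ne_nil _ (List.ne_nil_of_length_pos (by omega : 0 < cs.length))]
      by_cases h : (cs.head? == some c) = true <;> simp [h]
  | succ j ih =>
      rw [go_unfold (cs ++ [x]) [c] (j+1), go_unfold cs [c] (j+1),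
        List.drop_append_of_le_length (by omega : j+1 ≤ cs.length),
        isPrefixOf_singleton, isPrefixOf_singleton,
        List.head?_append_of_ne_nil _
          (List.ne_nil_of_length_pos (by rw [List.length_drop]; omega : 0 < (cs.drop (j+1)).length))]
      simp only [Nat.add_sub_cancel, Nat.succ_ne_zero, if_false]
      rw [ih (by omega)]

theorem rfind_snoc (cs : List Char) (x c : Char) :
    PySem.Chars.rfind (cs ++ [x]) [c] =
      if x = c then (cs.length : Int) else PySem.Chars.rfind cs [c] := by
  unfold PySem.Chars.rfind
  rw [List.length_append, List.length_singleton,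
    go_unfold (cs ++ [x]) [c] (cs.length + 1)]
  rw [show List.drop (cs.length + 1) (cs ++ [x]) = [] from by
    apply List.drop_eq_nil_of_le; simp]
  simp only [isPrefixOf_singleton, List.head?_nil, Nat.succ_ne_zero, if_false,
    Nat.add_sub_cancel]
  rw [go_unfold (cs ++ [x]) [c] cs.length,
    List.drop_append_of_le_length (le_refl _), List.drop_length, List.nil_append,
    isPrefixOf_singleton]
  by_cases hx : x = c
  · simp [hx]
  · have hfx : (([x].head? == some c)) = false := by
      simp [List.head?]; exact fun h => hx h
    rw [hfx]
    simp only [Bool.false_eq_true, if_false, hx]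
    rw [go_unfold cs [c] cs.length, List.drop_length, isPrefixOf_singleton]
    simp only [List.head?_nil]
    by_cases h0 : cs.length = 0
    · simp [h0]
    · simp only [h0, if_false]
      rw [go_snoc cs x c (cs.length - 1) (by omega)]
      simp

def chr1 (s : String) : Char := s.toList.headD ' '

theorem toList_single (x : String) (h : x = ")" ∨ x = "]") : x.toList = [chr1 x] := by
  rcases h with h | h <;> subst h <;> decide

theorem joinChars (finals : List String) (h : ∀ x ∈ finals, x = ")" ∨ x = "]") :
    (PySem.Str.join "" finals).toList = finals.map chr1 := by
  unfold PySem.Str.join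
  rw [String.toList_ofList]
  have h2 : finals.map String.toList = (finals.map chr1).map (fun c => [c]) := by
    rw [List.map_map]
    exact List.map_congr_left (fun x hx => toList_single x (h x hx))
  rw [show ("" : String).toList = [] from rfl, h2, PySem.Chars.join_nil_singletons]

-- finals = replicate k ")": rfind ")" = k-1 (-1 when empty)
theorem rfind_close_zero : PySem.Str.rfind (PySem.Str.join "" (List.replicate 0 ")")) ")" = -1 := by
  decide

theorem rfind_close_succ (s : Nat) :
    PySem.Str.rfind (PySem.Str.join "" (List.replicate (s + 1) ")")) ")" = (s : Int) := by
  show PySem.Chars.rfind _ _ = _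
  rw [joinChars _ (by intro x hx; rw [List.eq_of_mem_replicate hx]; exact Or.inl rfl)]
  rw [show (")" : String).toList = [chr1 ")"] from by decide]
  rw [List.replicate_succ', List.map_append]
  simp only [List.map_replicate, List.map_cons, List.map_nil]
  rw [rfind_snoc]
  simp

-- finals = replicate k ")" ++ ["]"]: rfind "]" = k
theorem rfind_bracket (k : Nat) :
    PySem.Str.rfind (PySem.Str.join "" (List.replicate k ")" ++ ["]"])) "]" = (k : Int) := by
  show PySem.Chars.rfind _ _ = _
  rw [joinChars _ (by
    intro x hx
    rcases List.mem_append.mp hx with hx | hx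
    · exact Or.inl (List.eq_of_mem_replicate hx)
    · simp at hx; exact Or.inr hx)]
  rw [show ("]" : String).toList = [chr1 "]"] from by decide]
  rw [List.map_append]
  simp only [List.map_replicate, List.map_cons, List.map_nil]
  rw [rfind_snoc]
  simp

theorem del_replicate_snoc {α : Type} (k : Nat) (a b : α) :
    (List.replicate k a ++ [b]).take k ++ (List.replicate k a ++ [b]).drop (k + 1) =
      List.replicate k a := by
  rw [List.take_append_of_le_length (by simp), List.take_of_length_le (by simp),
    List.drop_eq_nil_of_le (by simp), List.append_nil]

-- result[-1] of the shapes the two state machines keep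
theorem getLastD_cons (a d : String) (cl : List String) :
    (a :: cl).getLast?.getD d = cl.getLast?.getD a := by
  rw [List.getLast?_cons]
  simp

theorem last_bracket_cons (R cl : List String) :
    (PySem.List.pyGet? (R ++ "[" :: cl) (-1)).getD "" = cl.getLast?.getD "[" := by
  rw [PySem.List.pyGet?_neg_one, List.getLast?_append_of_ne_nil _ (by simp),
    ← getLastD_cons "[" "" cl]

theorem lastRel (p : Nat) (out : List String) (h : out ≠ []) :
    (PySem.List.pyGet? (List.replicate p "(" ++ out) (-1)).getD "" = out.getLast?.getD "" := by
  rw [PySem.List.pyGet?_neg_one, List.getLast?_append_of_ne_nil _ h]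

-- "[" never lands in the cleaned character-set content
theorem cleanStep_no_bracket (cl : List String) (t : String) (hcl : "[" ∉ cl) :
    "[" ∉ cleanStep cl t := by
  unfold cleanStep
  split_ifs with h1 h2
  · exact hcl
  · exact hcl
  · simp only [List.mem_append, List.mem_singleton]
    rintro (h | h)
    · exact hcl h
    · exact h1 (by simp [h])

theorem clean_no_bracket (body : List String) (cl : List String) (hcl : "[" ∉ cl) :
    "[" ∉ body.foldl cleanStep cl := by
  induction body generalizing cl with
  | nil => exact hcl
  | cons t ts ih => exact ih _ (cleanStep_no_bracket cl t hcl)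

-- A's in-charset fold over a ']'-free body = B's cleanStep fold
theorem cset_fold (body : List String) (hb : "]" ∉ body) (R cl fin : List String)
    (hcl : "[" ∉ cl) :
    body.foldl repairStep (.cset, R ++ "[" :: cl, fin) =
      (.cset, R ++ "[" :: body.foldl cleanStep cl, fin) := by
  induction body generalizing cl with
  | nil => rfl
  | cons t ts ih =>
      have ht : ¬t = "]" := fun h => hb (h ▸ List.mem_cons_self)
      have hts : "]" ∉ ts := fun h => hb (List.mem_cons_of_mem _ h)
      have hval : ((PySem.List.pyGet? (R ++ "[" :: cl) (-1)).getD "" == "|") =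
          (cl.getLast?.getD "" == "|") := by
        rw [last_bracket_cons]
        cases h : cl.getLast? with
        | none => simp
        | some v => simp
      have hstep : repairStep (.cset, R ++ "[" :: cl, fin) t =
          (.cset, R ++ "[" :: cleanStep cl t, fin) := by
        simp only [repairStep, repairInCharSet, cleanStep, hval]
        by_cases h1 : t = "["
        · simp [h1]
        · by_cases h2 : (t == "|" && (cl.getLast?.getD "" == "|")) = true
          · simp [ht, h1, h2]
          · simp only [eq_false_intro ht, eq_false_intro h1, beq_iff_eq, if_false,
              Bool.not_eq_true] at *
            rw [if_neg (by simp [h2]), if_neg (by simp [h2])]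
            simp
      rw [List.foldl_cons, List.foldl_cons, hstep]
      have hb' := hb
      exact ih hts _ (cleanStep_no_bracket cl t hcl)

-- closing ']' step from inside a character set
theorem close_step (R cl : List String) (k : Nat) (hcl : "[" ∉ cl) :
    repairStep (.cset, R ++ "[" :: cl, List.replicate k ")" ++ ["]"]) "]" =
      (.fol, R ++ (if cl = [] then ["]"] else "[" :: cl ++ ["]"]), List.replicate k ")") := by
  have hk : (((k : Nat) : Int) != -1) = true := by
    simp only [bne_iff_ne, ne_eq]
    omega
  simp only [repairStep, repairInCharSet, last_bracket_cons, rfind_bracket, hk,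
    Int.toNat_natCast, del_replicate_snoc, if_true]
  by_cases hc : cl = []
  · subst hc
    simp
  · have hlast : cl.getLast?.getD "[" ≠ "[" := by
      cases h : cl.getLast? with
      | none => exact absurd (List.getLast?_eq_none_iff.mp h) hc
      | some v =>
          have : v ∈ cl := List.mem_of_getLast? h
          simp only [Option.getD_some]
          exact fun e => hcl (e ▸ this)
    simp [hlast, hc, List.append_assoc]

theorem render_ne_nil (body : List String) : renderSet body ≠ [] := by
  show (if body.foldl cleanStep [] = [] then ["]"]
    else "[" :: body.foldl cleanStep [] ++ ["]"]) ≠ []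
  split <;> simp

-- splitUnits of a character-set chunk
theorem takeWhile_no_close (rest : List String) : "]" ∉ rest.takeWhile (· ≠ "]") := by
  intro h
  have := List.mem_takeWhile_imp h
  simp at this

theorem drop_head_close (l : List String) : ∀ (res : List String) (r0 : String),
    l.dropWhile (· ≠ "]") = r0 :: res → r0 = "]" := by
  induction l with
  | nil => intro res r0 h; simp [List.dropWhile] at h
  | cons x xs ih =>
      intro res r0 h
      rw [List.dropWhile_cons] at h
      by_cases hx : x = "]"
      · subst hx
        simp at h
        exact h.1.symm
      · simp only [hx, ne_eq, not_false_iff, decide_true, if_true] at h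
        exact ih res r0 h

-- a small closed fact about the end-metas set
theorem cem (t : String) : PySem.Set.contains endMetas t = (t == ")" || t == "]") := by
  by_cases h1 : t = ")"
  · subst h1; decide
  · by_cases h2 : t = "]"
    · subst h2; decide
    · have hmem : t ∉ endMetas := by
        intro h
        have := (PySem.Set.mem_ofList _ _).mp h
        simp only [List.mem_cons, List.not_mem_nil, or_false] at this
        rcases this with h | h
        · exact h1 h
        · exact h2 h
      simp [hmem, h1, h2]

theorem last_eq_bracket (R cl : List String) (hcl : "[" ∉ cl) :
    ((PySem.List.pyGet? (R ++ "[" :: cl) (-1)).getD "" == "[") = decide (cl = []) := by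
  rw [last_bracket_cons]
  cases h : cl.getLast? with
  | none => simp [List.getLast?_eq_none_iff.mp h]
  | some v =>
      have hv : v ∈ cl := List.mem_of_getLast? h
      have hne : cl ≠ [] := List.ne_nil_of_mem hv
      have : v ≠ "[" := fun e => hcl (e ▸ hv)
      simp [hne, this]

theorem renderSet_eq (body : List String) :
    renderSet body = if body.foldl cleanStep [] = [] then ["]"]
      else "[" :: body.foldl cleanStep [] ++ ["]"] := rfl

-- the main fol-phase lemma, by fuel induction (a '[' consumes a whole chunk)
theorem fol_main : ∀ (n : Nat) (genes out : List String) (opens pending : Nat),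
    genes.length ≤ n → (out = [] → genes.head? = some "[") →
    finishA (genes.foldl repairStep
        (.fol, List.replicate pending "(" ++ out, List.replicate opens ")")) =
      finishB ((splitUnits genes).foldl stepB (out, opens, pending)) := by
  intro n
  induction n with
  | zero =>
      intro genes out opens pending hlen hout
      have : genes = [] := List.eq_nil_of_length_eq_zero (by omega)
      subst this
      simp only [List.foldl_nil, splitUnits, finishA, finishB]
      simp [List.reverse_replicate, List.append_assoc]
  | succ m ih =>
      intro genes out opens pending hlen hout
      cases genes with
      | nil =>
          simp only [List.foldl_nil, splitUnits, finishA, finishB]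
          simp [List.reverse_replicate, List.append_assoc]
      | cons t rest =>
          by_cases htb : t = "["
          · -- character-set chunk
            subst htb
            have hnr : "[" ∉ repeatMetas := by decide
            have hstep : repairStep
                (.fol, List.replicate pending "(" ++ out, List.replicate opens ")") "[" =
                (.cset, (List.replicate pending "(" ++ out) ++ "[" :: ([] : List String),
                  List.replicate opens ")" ++ ["]"]) := by
              simp [repairStep, repairFollowing, hnr]
            have hsplitU : splitUnits ("[" :: rest) =
                .set (rest.takeWhile (· ≠ "]")) ::
                  splitUnits ((rest.dropWhile (· ≠ "]")).drop 1) := by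
              rw [splitUnits]
              simp
            have hb : "]" ∉ rest.takeWhile (· ≠ "]") := takeWhile_no_close rest
            have hcl : "[" ∉ (rest.takeWhile (· ≠ "]")).foldl cleanStep [] :=
              clean_no_bracket _ [] (by simp)
            have hfold1 : List.foldl repairStep
                (.fol, List.replicate pending "(" ++ out, List.replicate opens ")")
                ("[" :: rest) =
                List.foldl repairStep
                  (.cset, (List.replicate pending "(" ++ out) ++
                      "[" :: (rest.takeWhile (· ≠ "]")).foldl cleanStep [],
                    List.replicate opens ")" ++ ["]"]) (rest.dropWhile (· ≠ "]")) := by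
              conv_lhs => rw [List.foldl_cons, hstep,
                show rest = rest.takeWhile (· ≠ "]") ++ rest.dropWhile (· ≠ "]") from
                  List.takeWhile_append_dropWhile.symm,
                List.foldl_append, cset_fold _ hb _ [] _ (by simp)]
            cases hdw : rest.dropWhile (· ≠ "]") with
            | nil =>
                -- unclosed character set runs to the end of the stream
                rw [hfold1, hdw, List.foldl_nil, hsplitU, hdw]
                simp only [List.drop_nil, List.foldl_cons, List.foldl_nil, splitUnits, stepB]
                have hcond := last_eq_bracket (List.replicate pending "(" ++ out) _ hcl
                simp only [finishA, finishB, hcond, renderSet_eq]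
                by_cases hc : (rest.takeWhile (· ≠ "]")).foldl cleanStep [] = []
                · rw [hc]
                  simp only [decide_true]
                  rw [show (List.replicate pending "(" ++ out) ++ "[" :: ([] : List String) =
                      (List.replicate pending "(" ++ out) ++ ["["] from rfl]
                  simp [List.reverse_append, List.reverse_replicate,
                    List.append_assoc]
                · simp only [hc, decide_false]
                  simp [List.reverse_append, List.reverse_replicate, List.append_assoc]
            | cons r0 rest' =>
                have hr0 : r0 = "]" := drop_head_close rest rest' r0 hdw
                subst hr0
                rw [hfold1, hdw, List.foldl_cons, close_step _ _ _ hcl, hsplitU, hdw]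
                simp only [List.drop_succ_cons, List.drop_zero, List.foldl_cons, stepB]
                rw [show (List.replicate pending "(" ++ out) ++
                      (if (rest.takeWhile (· ≠ "]")).foldl cleanStep [] = [] then ["]"]
                        else "[" :: (rest.takeWhile (· ≠ "]")).foldl cleanStep [] ++ ["]"]) =
                    List.replicate pending "(" ++ (out ++ renderSet (rest.takeWhile (· ≠ "]")))
                    from by rw [renderSet_eq, List.append_assoc]]
                have hlen' : rest'.length ≤ m := by
                  have h1 : rest.length ≤ m := by simpa using hlen
                  have h2 : (rest.takeWhile (· ≠ "]")).length + ("]" :: rest').length =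
                      rest.length := by
                    conv_rhs => rw [show rest = rest.takeWhile (· ≠ "]") ++
                      rest.dropWhile (· ≠ "]") from List.takeWhile_append_dropWhile.symm, hdw]
                    simp
                  simp only [List.length_cons] at h2
                  omega
                exact ih rest' (out ++ renderSet (rest.takeWhile (· ≠ "]"))) opens pending hlen'
                  (fun h => absurd h (by simp [render_ne_nil]))
          · -- plain token
            have hsplitU : splitUnits (t :: rest) = .tok t :: splitUnits rest := by
              rw [splitUnits]
              simp [htb]
            have hout' : out ≠ [] := fun h => htb (by simpa using hout h)
            have hlenr : rest.length ≤ m := by simpa using hlen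
            rw [hsplitU, List.foldl_cons, List.foldl_cons]
            by_cases hr : PySem.Set.contains repeatMetas t = true
            · -- repeat meta
              have hr' : t ∈ repeatMetas := by simpa using hr
              have hlst := lastRel pending out hout'
              by_cases hs : PySem.Set.contains startMetas (out.getLast?.getD "") = true
              · have hs' : out.getLast?.getD "" ∈ startMetas := by simpa using hs
                have hA : repairStep (.fol, List.replicate pending "(" ++ out,
                    List.replicate opens ")") t =
                    (.fol, List.replicate pending "(" ++ out, List.replicate opens ")") := by
                  simp [repairStep, repairFollowing, hr', hlst, hs']
                have hB : stepB (out, opens, pending) (.tok t) = (out, opens, pending) := by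
                  simp only [stepB, hr, if_true]
                  rw [if_neg (fun hP => hP.2.1 hs)]
                rw [hA, hB]
                exact ih rest out opens pending hlenr (fun h => absurd h hout')
              · have hs' : out.getLast?.getD "" ∉ startMetas := by simpa using hs
                by_cases hrp : PySem.Set.contains repeatMetas (out.getLast?.getD "") = true
                · have hrp' : out.getLast?.getD "" ∈ repeatMetas := by simpa using hrp
                  have hA : repairStep (.fol, List.replicate pending "(" ++ out,
                      List.replicate opens ")") t =
                      (.fol, List.replicate pending "(" ++ out, List.replicate opens ")") := by
                    simp [repairStep, repairFollowing, hr', hlst, hs', hrp']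
                  have hB : stepB (out, opens, pending) (.tok t) = (out, opens, pending) := by
                    simp only [stepB, hr, if_true]
                    rw [if_neg (fun hP => hP.2.2 hrp)]
                  rw [hA, hB]
                  exact ih rest out opens pending hlenr (fun h => absurd h hout')
                · have hrp' : out.getLast?.getD "" ∉ repeatMetas := by simpa using hrp
                  have hq : out.getLast?.getD "" ≠ "?" := by
                    intro h
                    exact hrp' (by rw [h]; decide)
                  have hA : repairStep (.fol, List.replicate pending "(" ++ out,
                      List.replicate opens ")") t =
                      (.fol, List.replicate pending "(" ++ (out ++ [t]),
                        List.replicate opens ")") := by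
                    simp [repairStep, repairFollowing, hr', hlst, hs', hrp', hq]
                  have hB : stepB (out, opens, pending) (.tok t) =
                      (out ++ [t], opens, pending) := by
                    simp only [stepB, hr, if_true]
                    rw [if_pos ⟨hout', by simpa using hs, by simpa using hrp⟩]
                  rw [hA, hB]
                  exact ih rest (out ++ [t]) opens pending hlenr
                    (fun h => absurd h (by simp))
            · -- not a repeat meta: '(' / ')' / literal token
              have hrf : PySem.Set.contains repeatMetas t = false := by
                rcases h : PySem.Set.contains repeatMetas t with _ | _
                · rfl
                · exact absurd h hr
              by_cases hop : t = "("
              · subst hop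
                have hA : repairStep (.fol, List.replicate pending "(" ++ out,
                    List.replicate opens ")") "(" =
                    (.fol, List.replicate pending "(" ++ (out ++ ["("]),
                      List.replicate (opens + 1) ")") := by
                  simp [repairStep, repairFollowing,
                    show ("(" : String) ∉ repeatMetas from by decide, List.append_assoc,
                    List.replicate_succ']
                have hB : stepB (out, opens, pending) (.tok "(") =
                    (out ++ ["("], opens + 1, pending) := by
                  simp [stepB, show ("(" : String) ∉ repeatMetas from by decide]
                rw [hA, hB]
                exact ih rest (out ++ ["("]) (opens + 1) pending hlenr
                  (fun h => absurd h (by simp))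
              · by_cases hcp : t = ")"
                · subst hcp
                  cases opens with
                  | zero =>
                      have hA : repairStep (.fol, List.replicate pending "(" ++ out,
                          List.replicate 0 ")") ")" =
                          (.fol, List.replicate (pending + 1) "(" ++ (out ++ [")"]),
                            List.replicate 0 ")") := by
                        simp only [repairStep, repairFollowing, hrf, Bool.not_false, if_true]
                        rw [rfind_close_zero]
                        simp [List.replicate_succ, List.append_assoc]
                      have hB : stepB (out, 0, pending) (.tok ")") =
                          (out ++ [")"], 0, pending + 1) := by
                        simp [stepB, show (")" : String) ∉ repeatMetas from by decide]
                      rw [hA, hB]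
                      exact ih rest (out ++ [")"]) 0 (pending + 1) hlenr
                        (fun h => absurd h (by simp))
                  | succ sp =>
                      have hA : repairStep (.fol, List.replicate pending "(" ++ out,
                          List.replicate (sp + 1) ")") ")" =
                          (.fol, List.replicate pending "(" ++ (out ++ [")"]),
                            List.replicate sp ")") := by
                        simp only [repairStep, repairFollowing, hrf, Bool.not_false, if_true]
                        rw [rfind_close_succ sp]
                        have h1 : (((sp : Nat) : Int) != -1) = true := by
                          simp only [bne_iff_ne, ne_eq]
                          omega
                        simp [h1, List.append_assoc]
                      have hB : stepB (out, sp + 1, pending) (.tok ")") =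
                          (out ++ [")"], sp, pending) := by
                        simp [stepB, show (")" : String) ∉ repeatMetas from by decide]
                      rw [hA, hB]
                      exact ih rest (out ++ [")"]) sp pending hlenr
                        (fun h => absurd h (by simp))
                · have hA : repairStep (.fol, List.replicate pending "(" ++ out,
                      List.replicate opens ")") t =
                      (.fol, List.replicate pending "(" ++ (out ++ [t]),
                        List.replicate opens ")") := by
                    simp only [repairStep, repairFollowing, hrf, Bool.not_false, if_true]
                    rw [if_neg (show ¬(t == "[") = true from by simpa using htb),
                      if_neg (show ¬(t == "(") = true from by simpa using hop),
                      if_neg (show ¬(t == ")") = true from by simpa using hcp)]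
                    simp [List.append_assoc]
                  have hB : stepB (out, opens, pending) (.tok t) =
                      (out ++ [t], opens, pending) := by
                    simp only [stepB, hrf, Bool.false_eq_true, if_false]
                    rw [if_neg (by simpa using hop), if_neg (by simpa using hcp)]
                  rw [hA, hB]
                  exact ih rest (out ++ [t]) opens pending hlenr
                    (fun h => absurd h (by simp))

-- the ignorable prefix, then hand over to fol_main
theorem ign_main : ∀ genes : List String,
    finishA (genes.foldl repairStep (.ign, [], [])) =
      finishB (((splitUnits genes).dropWhile skippableU).foldl stepB ([], 0, 0)) := by
  intro genes
  induction genes with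
  | nil => simp [finishA, finishB, splitUnits]
  | cons t rest ih =>
      by_cases hskip : (PySem.Set.contains repeatMetas t || t == ")" || t == "]") = true
      · -- ignorable token: both sides skip it
        have htb : t ≠ "[" := by
          rintro rfl
          simp only [show PySem.Set.contains repeatMetas "[" = false from by decide,
            Bool.false_or] at hskip
          exact absurd hskip (by decide)
        have hcond : (PySem.Set.contains repeatMetas t || PySem.Set.contains endMetas t)
            = true := by
          rw [cem t, ← Bool.or_assoc]
          exact hskip
        have hstep : repairStep (.ign, ([] : List String), ([] : List String)) t =
            (.ign, [], []) := by
          simp only [repairStep, repairIgnore, hcond, if_true]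
        have hsplitU : splitUnits (t :: rest) = .tok t :: splitUnits rest := by
          rw [splitUnits]
          simp [htb]
        rw [List.foldl_cons, hstep, hsplitU, List.dropWhile_cons]
        simp only [skippableU, hskip, if_true]
        exact ih
      · -- first kept token
        have hskipf : (PySem.Set.contains repeatMetas t || (t == ")" || t == "]"))
            = false := by
          rw [← Bool.or_assoc]
          simpa using hskip
        have hrf : PySem.Set.contains repeatMetas t = false := by
          cases h : PySem.Set.contains repeatMetas t
          · rfl
          · rw [h] at hskipf
            simp at hskipf
        have h1 : t ≠ ")" := by
          rintro rfl
          exact absurd hskipf (by simp)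
        have h2 : t ≠ "]" := by
          rintro rfl
          exact absurd hskipf (by simp)
        have hdw : ((splitUnits (t :: rest)).dropWhile skippableU) = splitUnits (t :: rest) := by
          by_cases htb : t = "["
          · subst htb
            rw [splitUnits]
            simp [skippableU]
          · have hnmem : ¬((t ∈ repeatMetas ∨ t = ")") ∨ t = "]") := by simpa using hskip
            rw [splitUnits]
            simp only [eq_false_intro htb, beq_iff_eq, if_false, List.dropWhile_cons]
            simp [skippableU, hnmem]
        rw [hdw]
        by_cases htb : t = "["
        · subst htb
          have hswap : List.foldl repairStep (.ign, [], []) ("[" :: rest) =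
              List.foldl repairStep
                (.fol, List.replicate 0 "(" ++ ([] : List String), List.replicate 0 ")")
                ("[" :: rest) := by
            rw [List.foldl_cons, List.foldl_cons]
            congr 1
          rw [hswap]
          exact fol_main ("[" :: rest).length ("[" :: rest) [] 0 0 le_rfl (fun _ => rfl)
        · -- one manual step, then fol_main on the rest
          have hsplitU : splitUnits (t :: rest) = .tok t :: splitUnits rest := by
            rw [splitUnits]
            simp [htb]
          rw [hsplitU, List.foldl_cons, List.foldl_cons]
          have hcondf : (PySem.Set.contains repeatMetas t || PySem.Set.contains endMetas t)
              = false := by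
            rw [cem t]
            exact hskipf
          have hstepA : repairStep (.ign, ([] : List String), ([] : List String)) t =
              (.fol, [t], if t == "(" then [")"] else []) := by
            simp only [repairStep, repairIgnore, hcondf, Bool.false_eq_true, if_false]
            rw [if_neg (show ¬(t == "[") = true from by simpa using htb)]
            simp
          have hstepB : stepB (([] : List String), 0, 0) (.tok t) =
              ([t], (if t = "(" then 1 else 0), 0) := by
            simp only [stepB, hrf, Bool.false_eq_true, if_false]
            by_cases hop : t = "("
            · simp [hop]
            · rw [if_neg (show ¬(t == "(") = true from by simpa using hop),
                if_neg (show ¬(t == ")") = true from by simpa using h1)]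
              simp [hop]
          rw [hstepA, hstepB]
          by_cases hop : t = "("
          · subst hop
            simp only [show (("(" : String) == "(") = true from by decide]
            have := fol_main rest.length rest ["("] 1 0 le_rfl (fun h => absurd h (by simp))
            simpa using this
          · rw [if_neg (show ¬(t == "(") = true from by simpa using hop), if_neg hop]
            have := fol_main rest.length rest [t] 0 0 le_rfl (fun h => absurd h (by simp))
            simpa using this

-- ===== VERDICT (by name: the statement is the Claim_ definition above) =====
theorem repair_regex_spec : Claim_equal_repair_regex := by
  intro genes _
  show repair_regex genes = repair_regex_alt genes
  rw [repair_regex_eq_finishA, repair_regex_alt_eq_finishB]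
  exact ign_main genes
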